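-- pv_equiv track=rewrite | github.com/colaberry/ai-assisted-development-method | tooling/hooks/sprint_gate.py | target_in_allowlist
-- ===== SOURCE A (Python) =====
-- from typing import List, Optional, Sequence, Tuple
--
-- def _normalize_allowlist(entries: Sequence[str]) -> List[str]:
--     """Normalize separators and strip leading './' for comparison."""
--     normalized: List[str] = []
--     for entry in entries:
--         cleaned = entry.replace("\\", "/").strip()
--         if cleaned.startswith("./"):
--             cleaned = cleaned[2:]
--         if cleaned:
--             normalized.append(cleaned)
--     return normalized
--
-- def target_in_allowlist(rel_target: str, allowlist: Sequence[str]) -> bool: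
--     rel = rel_target.replace("\\", "/")
--     for entry in _normalize_allowlist(allowlist):
--         if rel == entry:
--             return True
--         # Directory entries ("src/auth/") match files beneath them.
--         if entry.endswith("/") and rel.startswith(entry):
--             return True
--     return False
-- ===== SOURCE B (Python) =====
-- def target_in_allowlist(rel_target, allowlist):
--     rel = rel_target.replace("\\", "/")
--     # An entry matches exactly when it equals rel, or it is a prefix of rel
--     # ending in "/" (directory entry). Precompute that candidate set from rel,
--     # then scan the allowlist once with a membership test.
--     candidates = {rel}
--     for i, ch in enumerate(rel):
--         if ch == "/":
--             candidates.add(rel[:i + 1])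
--     for entry in allowlist:
--         cleaned = entry.replace("\\", "/").strip()
--         if cleaned.startswith("./"):
--             cleaned = cleaned[2:]
--         if cleaned and cleaned in candidates:
--             return True
--     return False
-- ===== Notes on version B (the rewrite author's own statement) =====
-- stated objective: alternative
-- what changed: Instead of testing every normalized entry against rel with an equality and a startswith prefix test, B precomputes from the target the finite set of all strings that could possibly match it (rel itself plus each '/'-terminated prefix of rel) and then scans the allowlist once with a pure set-membership test, eliminating the per-entry prefix comparison entirely.
import Mathlib
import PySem

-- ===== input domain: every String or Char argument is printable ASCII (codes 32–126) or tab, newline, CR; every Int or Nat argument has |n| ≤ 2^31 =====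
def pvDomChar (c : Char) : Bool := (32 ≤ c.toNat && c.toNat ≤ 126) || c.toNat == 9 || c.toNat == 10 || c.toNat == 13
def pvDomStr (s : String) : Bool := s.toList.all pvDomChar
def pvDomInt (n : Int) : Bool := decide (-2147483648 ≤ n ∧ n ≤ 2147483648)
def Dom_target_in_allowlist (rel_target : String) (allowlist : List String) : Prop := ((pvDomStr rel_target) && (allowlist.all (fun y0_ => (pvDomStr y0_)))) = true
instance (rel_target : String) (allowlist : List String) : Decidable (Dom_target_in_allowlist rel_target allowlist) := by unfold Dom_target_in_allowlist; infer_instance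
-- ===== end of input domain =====

-- B inverts A's per-entry equality+prefix tests: it precomputes from the target the set
-- of all strings that can match it (rel plus each '/'-terminated prefix of rel) and scans
-- the allowlist once with a membership test (objective: alternative; similar cost).

-- ===== PORT A =====
-- normalization of one entry: entry.replace("\\","/").strip(), minus a leading "./"
def pvClean (entry : String) : String :=
  let cleaned := PySem.Str.strip (PySem.Str.replace entry "\\" "/")
  if PySem.Str.startswith cleaned "./" then PySem.Str.slice cleaned (some 2) none else cleaned

def normalize_allowlist : List String → List String
  | [] => []
  | entry :: rest =>
    let cleaned := pvClean entry
    if cleaned = "" then normalize_allowlist rest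
    else cleaned :: normalize_allowlist rest

-- the early-return for-loop of A
def pvScanA (rel : String) : List String → Bool
  | [] => false
  | entry :: rest =>
    if rel = entry then true
    else if PySem.Str.endswith entry "/" && PySem.Str.startswith rel entry then true
    else pvScanA rel rest

def target_in_allowlist (rel_target : String) (allowlist : List String) : Bool :=
  let rel := PySem.Str.replace rel_target "\\" "/"
  pvScanA rel (normalize_allowlist allowlist)

-- ===== PORT B =====
-- candidates = {rel}; for i, ch in enumerate(rel): if ch == "/": candidates.add(rel[:i+1])
def pvCandidates (rel : String) : PySem.Set String :=
  (PySem.List.enumerate rel.toList 0).foldl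
    (fun s p => if p.2 = '/' then PySem.Set.add s (PySem.Str.slice rel none (some (p.1 + 1))) else s)
    (PySem.Set.add PySem.Set.empty rel)

-- the early-return for-loop of B: normalize each entry, test membership in candidates
def pvScanB (cands : PySem.Set String) : List String → Bool
  | [] => false
  | entry :: rest =>
    let cleaned := pvClean entry
    if cleaned ≠ "" && PySem.Set.contains cands cleaned then true
    else pvScanB cands rest

def target_in_allowlist_alt (rel_target : String) (allowlist : List String) : Bool :=
  let rel := PySem.Str.replace rel_target "\\" "/"
  pvScanB (pvCandidates rel) allowlist

-- ===== PRECONDITION & SPEC =====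
def Spec_target_in_allowlist (rel_target : String) (allowlist : List String) (out : Bool) : Prop := out = target_in_allowlist_alt rel_target allowlist
instance (rel_target : String) (allowlist : List String) (out : Bool) : Decidable (Spec_target_in_allowlist rel_target allowlist out) := by unfold Spec_target_in_allowlist; infer_instance

-- ===== CLAIM (what is proved, stated in full; the proofs are below) =====
def Claim_equal_target_in_allowlist : Prop := ∀ (rel_target : String) (allowlist : List String), Dom_target_in_allowlist rel_target allowlist → Spec_target_in_allowlist rel_target allowlist (target_in_allowlist rel_target allowlist)

-- ===== LEMMAS AND PROOFS =====

-- per-entry match predicate of A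
def pvHit (rel e : String) : Bool :=
  rel = e || (PySem.Str.endswith e "/" && PySem.Str.startswith rel e)

lemma pvScanA_normalize (rel : String) (l : List String) :
    pvScanA rel (normalize_allowlist l)
      = l.any (fun e => pvClean e ≠ "" && pvHit rel (pvClean e)) := by
  induction l with
  | nil => rfl
  | cons e rest ih =>
    simp only [normalize_allowlist, List.any_cons]
    by_cases h : pvClean e = ""
    · simp [h, ih]
    · simp only [if_neg h, pvScanA, pvHit]
      by_cases h1 : rel = pvClean e
      · simp [h, h1]
      · by_cases h2 : (PySem.Chars.endswith (pvClean e).toList ['/'] &&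
            PySem.Chars.startswith rel.toList (pvClean e).toList) = true
        · simp [h, h1, h2]
        · simp [h, h1, h2, ih, pvHit]

lemma pvScanB_any (cands : PySem.Set String) (l : List String) :
    pvScanB cands l = l.any (fun e => pvClean e ≠ "" && PySem.Set.contains cands (pvClean e)) := by
  induction l with
  | nil => rfl
  | cons e rest ih =>
    by_cases h1 : pvClean e = ""
    · simp [pvScanB, h1, ih]
    · by_cases h2 : PySem.Set.contains cands (pvClean e) = true
      · simp [pvScanB, h1, ih]
      · simp [pvScanB, h1, ih]

-- membership in the candidate fold = membership in the seed OR one of the added prefixes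
lemma contains_candidates_fold (rel c : String) (l : List (Int × Char)) (s : PySem.Set String) :
    PySem.Set.contains
        (l.foldl (fun s p => if p.2 = '/' then PySem.Set.add s (PySem.Str.slice rel none (some (p.1 + 1))) else s) s) c
      = (PySem.Set.contains s c
          || l.any (fun p => p.2 = '/' && c = PySem.Str.slice rel none (some (p.1 + 1)))) := by
  induction l generalizing s with
  | nil => simp
  | cons p rest ih =>
    simp only [List.foldl_cons, List.any_cons]
    by_cases hp : p.2 = '/'
    · rw [if_pos hp, ih, Bool.eq_iff_iff]
      simp only [Bool.or_eq_true, Bool.and_eq_true, decide_eq_true_eq,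
        PySem.Set.contains_iff, PySem.Set.mem_add, hp]
      tauto
    · rw [if_neg hp, ih]
      simp [hp]

-- pure list fact: the '/'-terminated proper-or-full prefixes of r are exactly the
-- take (k+1) at a '/' position
lemma slash_prefix_iff (r c : List Char) :
    (∃ k : Nat, ∃ h : k < r.length, r[k] = '/' ∧ c = r.take (k + 1))
      ↔ (['/'] <:+ c ∧ c <+: r) := by
  constructor
  · rintro ⟨k, hk, hslash, rfl⟩
    refine ⟨⟨r.take k, ?_⟩, List.take_prefix _ _⟩
    rw [List.take_add_one, List.getElem?_eq_getElem hk, hslash]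
    rfl
  · rintro ⟨⟨t, ht⟩, hpre⟩
    have hlen : c.length ≤ r.length := hpre.length_le
    have hclen : c.length = t.length + 1 := by rw [← ht]; simp
    have hk : t.length < r.length := by omega
    have htake : c = r.take (t.length + 1) := by
      have h0 := List.prefix_iff_eq_take.mp hpre
      rwa [hclen] at h0
    refine ⟨t.length, hk, ?_, htake⟩
    have hsplit : r.take (t.length + 1) = r.take t.length ++ [r[t.length]] := by
      rw [List.take_add_one, List.getElem?_eq_getElem hk]; rfl
    have h2 : t ++ ['/'] = r.take t.length ++ [r[t.length]] := by rw [ht, htake, hsplit]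
    have h3 := (List.append_inj' h2 rfl).2
    simpa using h3.symm

lemma contains_candidates (rel c : String) :
    PySem.Set.contains (pvCandidates rel) c
      = (c = rel || (PySem.Str.endswith c "/" && PySem.Str.startswith rel c)) := by
  unfold pvCandidates
  rw [contains_candidates_fold, Bool.eq_iff_iff]
  simp only [Bool.or_eq_true, List.any_eq_true, Bool.and_eq_true, decide_eq_true_eq,
    PySem.Set.contains_iff, PySem.Set.mem_add]
  constructor
  · rintro (h | ⟨p, hp, hslash, hc⟩)
    · simp [PySem.Set.empty] at h
      exact Or.inl h
    · right
      obtain ⟨k, hk, rfl⟩ := (PySem.List.mem_enumerate_iff _ _ _).mp hp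
      simp only [zero_add] at hslash hc ⊢
      have hcl : c.toList = rel.toList.take (k + 1) := by
        rw [hc, PySem.Str.toList_slice, PySem.Chars.slice_eq_listSlice,
          show ((k : Int) + 1) = ((k + 1 : Nat) : Int) by push_cast; ring,
          PySem.List.slice_to_natCast]
      have : ['/'] <:+ c.toList ∧ c.toList <+: rel.toList :=
        (slash_prefix_iff rel.toList c.toList).mp ⟨k, hk, by simpa using hslash, by simpa using hcl⟩
      constructor
      · rw [PySem.Str.endswith_eq]; exact (PySem.Chars.endswith_iff _ _).mpr (by simpa using this.1)
      · rw [PySem.Str.startswith_eq]; exact (PySem.Chars.startswith_iff _ _).mpr this.2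
  · rintro (h | ⟨hend, hstart⟩)
    · exact Or.inl (by simp [PySem.Set.empty, h])
    · right
      have h1 : ['/'] <:+ c.toList := by
        rw [PySem.Str.endswith_eq] at hend
        simpa using (PySem.Chars.endswith_iff _ _).mp hend
      have h2 : c.toList <+: rel.toList := by
        rw [PySem.Str.startswith_eq] at hstart
        exact (PySem.Chars.startswith_iff _ _).mp hstart
      obtain ⟨k, hk, hslash, htake⟩ := (slash_prefix_iff rel.toList c.toList).mpr ⟨h1, h2⟩
      refine ⟨((0 : Int) + k, rel.toList[k]), ?_, by simpa using hslash, ?_⟩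
      · exact (PySem.List.mem_enumerate_iff _ _ _).mpr ⟨k, hk, rfl⟩
      · apply String.toList_injective
        rw [PySem.Str.toList_slice, PySem.Chars.slice_eq_listSlice,
          show ((0 : Int) + (k : Int) + 1) = ((k + 1 : Nat) : Int) by push_cast; ring,
          PySem.List.slice_to_natCast]
        exact htake

-- A's hit test written with the equality flipped, to line up with set membership
lemma pvHit_eq (rel c : String) :
    pvHit rel c = (c = rel || (PySem.Str.endswith c "/" && PySem.Str.startswith rel c)) := by
  unfold pvHit
  rw [Bool.eq_iff_iff]
  simp only [Bool.or_eq_true, Bool.and_eq_true, decide_eq_true_eq]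
  constructor
  · rintro (h | h)
    · exact Or.inl h.symm
    · exact Or.inr h
  · rintro (h | h)
    · exact Or.inl h.symm
    · exact Or.inr h

-- ===== VERDICT (by name: the statement is the Claim_ definition above) =====
theorem target_in_allowlist_spec : Claim_equal_target_in_allowlist := by
  intro rel_target allowlist _
  unfold Spec_target_in_allowlist target_in_allowlist target_in_allowlist_alt
  rw [pvScanA_normalize, pvScanB_any]
  apply PySem.List.any_congr_mem
  intro e _
  rw [contains_candidates, ← pvHit_eq]
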